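-- pv_equiv track=rewrite | github.com/Matt-Unterslak/advent-of-code-python | 2016/day_2/main.py | solve_keypad_5_by_5
-- ===== SOURCE A (Python) =====
-- KEYPAD_5_BY_5 = [
--     [" ", " ", "1", " ", " "],
--     [" ", "2", "3", "4", " "],
--     ["5", "6", "7", "8", "9"],
--     [" ", "A", "B", "C", " "],
--     [" ", " ", "D", " ", " "],
-- ]
--
-- def move_up(start_x, start_y, max_grid: int, keypad: list[list[str]]):
--     if 0 <= start_y - 1 <= max_grid and keypad[start_x][start_y - 1] != " ":
--         return start_y - 1
--     else:
--         return start_y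
--
-- def move_down(start_x, start_y, max_grid: int, keypad: list[list[str]]):
--     if 0 <= start_y + 1 <= max_grid and keypad[start_x][start_y + 1] != " ":
--         return start_y + 1
--     else:
--         return start_y
--
-- def move_right(start_x, start_y, max_grid: int, keypad: list[list[str]]):
--     if 0 <= start_x + 1 <= max_grid and keypad[start_x + 1][start_y] != " ":
--         return start_x + 1
--     else:
--         return start_x
--
-- def move_left(start_x, start_y, max_grid: int, keypad: list[list[str]]):
--     if 0 <= start_x - 1 <= max_grid and keypad[start_x - 1][start_y] != " ":
--         return start_x - 1
--     else:
--         return start_x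
--
-- def solve_keypad_5_by_5(input_str: str):
--     instructions: list[str] = input_str.split("\n")
--     start_location = [2, 0]
--     max_grid: int = 4
--     result = []
--     for instruction in instructions:
--         for direction in instruction:
--             match direction:
--                 case "U":
--                     start_location[0] = move_up(
--                         start_location[1], start_location[0], max_grid, KEYPAD_5_BY_5
--                     )
--                 case "D":
--                     start_location[0] = move_down(
--                         start_location[1], start_location[0], max_grid, KEYPAD_5_BY_5
--                     )
--                 case "R":
--                     start_location[1] = move_right(
--                         start_location[1], start_location[0], max_grid, KEYPAD_5_BY_5
--                     )
--                 case "L":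
--                     start_location[1] = move_left(
--                         start_location[1], start_location[0], max_grid, KEYPAD_5_BY_5
--                     )
--
--         key_number = KEYPAD_5_BY_5[start_location[0]][start_location[1]]
--         result.append(key_number)
--     return "".join([str(x) for x in result])
-- ===== SOURCE B (Python) =====
-- NEIGHBOURS = {
--     "1": {"D": "3"},
--     "2": {"R": "3", "D": "6"},
--     "3": {"U": "1", "L": "2", "R": "4", "D": "7"},
--     "4": {"L": "3", "D": "8"},
--     "5": {"R": "6"},
--     "6": {"U": "2", "L": "5", "R": "7", "D": "A"},
--     "7": {"U": "3", "L": "6", "R": "8", "D": "B"},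
--     "8": {"U": "4", "L": "7", "R": "9", "D": "C"},
--     "9": {"L": "8"},
--     "A": {"U": "6", "R": "B"},
--     "B": {"U": "7", "L": "A", "R": "C", "D": "D"},
--     "C": {"U": "8", "L": "B"},
--     "D": {"U": "B"},
-- }
--
-- def solve_keypad_5_by_5(input_str: str):
--     current = "5"
--     out = []
--     for line in input_str.split("\n"):
--         for ch in line:
--             current = NEIGHBOURS[current].get(ch, current)
--         out.append(current)
--     return "".join(out)
-- ===== Notes on version B (the rewrite author's own statement) =====
-- stated objective: idiomatic
-- what changed: Replaces the coordinate simulation on the 5x5 grid (mutable [row,col] plus four bounds-checking move helpers) with a precomputed button->direction->button transition table looked up per character, tracking only the current button label.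
import Mathlib
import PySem

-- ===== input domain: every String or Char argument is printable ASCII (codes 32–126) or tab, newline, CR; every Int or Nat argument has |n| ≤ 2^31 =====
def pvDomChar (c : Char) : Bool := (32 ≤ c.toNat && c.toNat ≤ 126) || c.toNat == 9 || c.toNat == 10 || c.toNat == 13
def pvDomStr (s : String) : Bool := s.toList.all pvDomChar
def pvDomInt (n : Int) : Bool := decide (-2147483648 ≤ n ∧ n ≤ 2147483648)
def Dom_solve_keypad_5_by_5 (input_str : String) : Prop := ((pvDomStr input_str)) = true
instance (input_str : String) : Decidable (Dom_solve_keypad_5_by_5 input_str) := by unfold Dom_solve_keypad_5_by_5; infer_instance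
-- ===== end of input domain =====

-- B replaces the coordinate simulation over the 5×5 grid by a precomputed
-- button→direction→button transition table (idiomatic, data-driven; same cost).

-- ===== PORT A =====
def KEYPAD_5_BY_5 : List (List String) :=
  [[" ", " ", "1", " ", " "],
   [" ", "2", "3", "4", " "],
   ["5", "6", "7", "8", "9"],
   [" ", "A", "B", "C", " "],
   [" ", " ", "D", " ", " "]]

-- keypad[x][y]: both indices are in range whenever A evaluates this (the guards
-- and the loop invariant keep them in 0..4), so the getD defaults are never hit; exact there.
def kget (keypad : List (List String)) (x y : Int) : String :=
  (PySem.List.pyGet? ((PySem.List.pyGet? keypad x).getD []) y).getD " "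

def move_up (start_x start_y : Int) (max_grid : Int) (keypad : List (List String)) : Int :=
  if 0 ≤ start_y - 1 ∧ start_y - 1 ≤ max_grid ∧ kget keypad start_x (start_y - 1) ≠ " " then
    start_y - 1
  else
    start_y

def move_down (start_x start_y : Int) (max_grid : Int) (keypad : List (List String)) : Int :=
  if 0 ≤ start_y + 1 ∧ start_y + 1 ≤ max_grid ∧ kget keypad start_x (start_y + 1) ≠ " " then
    start_y + 1
  else
    start_y

def move_right (start_x start_y : Int) (max_grid : Int) (keypad : List (List String)) : Int :=
  if 0 ≤ start_x + 1 ∧ start_x + 1 ≤ max_grid ∧ kget keypad (start_x + 1) start_y ≠ " " then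
    start_x + 1
  else
    start_x

def move_left (start_x start_y : Int) (max_grid : Int) (keypad : List (List String)) : Int :=
  if 0 ≤ start_x - 1 ∧ start_x - 1 ≤ max_grid ∧ kget keypad (start_x - 1) start_y ≠ " " then
    start_x - 1
  else
    start_x

-- one iteration of A's inner 'match direction' (start_location as a pair)
def pvStepA (loc : Int × Int) (direction : Char) : Int × Int :=
  if direction = 'U' then (move_up loc.2 loc.1 4 KEYPAD_5_BY_5, loc.2)
  else if direction = 'D' then (move_down loc.2 loc.1 4 KEYPAD_5_BY_5, loc.2)
  else if direction = 'R' then (loc.1, move_right loc.2 loc.1 4 KEYPAD_5_BY_5)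
  else if direction = 'L' then (loc.1, move_left loc.2 loc.1 4 KEYPAD_5_BY_5)
  else loc

def solve_keypad_5_by_5 (input_str : String) : String :=
  let instructions : List String := (PySem.Str.split? input_str "\n").getD []
  let fin :=
    instructions.foldl
      (fun (st : (Int × Int) × List String) instruction =>
        let loc := instruction.toList.foldl pvStepA st.1
        (loc, st.2 ++ [kget KEYPAD_5_BY_5 loc.1 loc.2]))
      ((2, 0), [])
  PySem.Str.join "" fin.2

-- ===== PORT B =====
def NEIGHBOURS : PySem.Dict String (PySem.Dict String String) :=
  PySem.Dict.mk
    [("1", PySem.Dict.mk [("D", "3")]),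
     ("2", PySem.Dict.mk [("R", "3"), ("D", "6")]),
     ("3", PySem.Dict.mk [("U", "1"), ("L", "2"), ("R", "4"), ("D", "7")]),
     ("4", PySem.Dict.mk [("L", "3"), ("D", "8")]),
     ("5", PySem.Dict.mk [("R", "6")]),
     ("6", PySem.Dict.mk [("U", "2"), ("L", "5"), ("R", "7"), ("D", "A")]),
     ("7", PySem.Dict.mk [("U", "3"), ("L", "6"), ("R", "8"), ("D", "B")]),
     ("8", PySem.Dict.mk [("U", "4"), ("L", "7"), ("R", "9"), ("D", "C")]),
     ("9", PySem.Dict.mk [("L", "8")]),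
     ("A", PySem.Dict.mk [("U", "6"), ("R", "B")]),
     ("B", PySem.Dict.mk [("U", "7"), ("L", "A"), ("R", "C"), ("D", "D")]),
     ("C", PySem.Dict.mk [("U", "8"), ("L", "B")]),
     ("D", PySem.Dict.mk [("U", "B")])]

-- NEIGHBOURS[current].get(ch, current); 'current' is always a key of NEIGHBOURS,
-- so the empty-dict default for the outer lookup is never hit; exact there.
def pvStepB (current : String) (ch : Char) : String :=
  (PySem.Dict.getD NEIGHBOURS current PySem.Dict.empty).getD (String.ofList [ch]) current

def solve_keypad_5_by_5_alt (input_str : String) : String :=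
  let fin :=
    ((PySem.Str.split? input_str "\n").getD []).foldl
      (fun (st : String × List String) line =>
        let cur := line.toList.foldl pvStepB st.1
        (cur, st.2 ++ [cur]))
      ("5", [])
  PySem.Str.join "" fin.2

-- ===== PRECONDITION & SPEC =====
def Spec_solve_keypad_5_by_5 (input_str : String) (out : String) : Prop := out = solve_keypad_5_by_5_alt input_str
instance (input_str : String) (out : String) : Decidable (Spec_solve_keypad_5_by_5 input_str out) := by unfold Spec_solve_keypad_5_by_5; infer_instance

-- ===== CLAIM (what is proved, stated in full; the proofs are below) =====
def Claim_equal_solve_keypad_5_by_5 : Prop := ∀ (input_str : String), Dom_solve_keypad_5_by_5 input_str → Spec_solve_keypad_5_by_5 input_str (solve_keypad_5_by_5 input_str)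

-- ===== LEMMAS AND PROOFS =====

-- the 13 coordinates of non-blank buttons (A's reachable start_location values)
def pvPositions : List (Int × Int) :=
  [(0, 2), (1, 1), (1, 2), (1, 3), (2, 0), (2, 1), (2, 2), (2, 3), (2, 4),
   (3, 1), (3, 2), (3, 3), (4, 2)]

def pvBtn (loc : Int × Int) : String := kget KEYPAD_5_BY_5 loc.1 loc.2

lemma pvStepB_other (s : String) (ch : Char)
    (hU : ch ≠ 'U') (hD : ch ≠ 'D') (hR : ch ≠ 'R') (hL : ch ≠ 'L') :
    pvStepB s ch = s := by
  have key : ∀ c : Char, c ≠ ch → (String.ofList [c] == String.ofList [ch]) = false := by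
    intro c hc; simp [String.ext_iff]; exact hc
  have h1 : (("U" : String) == String.ofList [ch]) = false := key 'U' (Ne.symm hU)
  have h2 : (("D" : String) == String.ofList [ch]) = false := key 'D' (Ne.symm hD)
  have h3 : (("R" : String) == String.ofList [ch]) = false := key 'R' (Ne.symm hR)
  have h4 : (("L" : String) == String.ofList [ch]) = false := key 'L' (Ne.symm hL)
  have hgd : ∀ d ∈ PySem.Dict.values NEIGHBOURS, PySem.Dict.getD d (String.ofList [ch]) s = s := by
    intro d hd
    fin_cases hd <;>
      simp [PySem.Dict.getD_eq_get?_getD, h1, h2, h3, h4, PySem.Dict.get?]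
  unfold pvStepB
  rcases h : PySem.Dict.get? NEIGHBOURS s with _ | d
  · simp only [PySem.Dict.getD_eq_get?_getD, h, Option.getD_none]
    simp [PySem.Dict.get?, PySem.Dict.empty]
  · simp only [PySem.Dict.getD_eq_get?_getD, h, Option.getD_some]
    rw [← PySem.Dict.getD_eq_get?_getD]
    exact hgd d (by
      have := PySem.Dict.mem_items_of_get?_eq_some (d := NEIGHBOURS) h
      simp [PySem.Dict.values]
      exact ⟨s, this⟩)

lemma pvStep_agrees (loc : Int × Int) (hloc : loc ∈ pvPositions) (ch : Char) :
    pvStepA loc ch ∈ pvPositions ∧ pvStepB (pvBtn loc) ch = pvBtn (pvStepA loc ch) := by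
  by_cases hU : ch = 'U'
  · subst hU; fin_cases hloc <;> exact ⟨by decide, by decide⟩
  by_cases hD : ch = 'D'
  · subst hD; fin_cases hloc <;> exact ⟨by decide, by decide⟩
  by_cases hR : ch = 'R'
  · subst hR; fin_cases hloc <;> exact ⟨by decide, by decide⟩
  by_cases hL : ch = 'L'
  · subst hL; fin_cases hloc <;> exact ⟨by decide, by decide⟩
  · have hA : pvStepA loc ch = loc := by
      simp [pvStepA, hU, hD, hR, hL]
    rw [hA]
    exact ⟨hloc, pvStepB_other _ _ hU hD hR hL⟩

lemma pvLine_inv (cs : List Char) (loc : Int × Int) (hloc : loc ∈ pvPositions) :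
    cs.foldl pvStepA loc ∈ pvPositions ∧
      cs.foldl pvStepB (pvBtn loc) = pvBtn (cs.foldl pvStepA loc) := by
  induction cs generalizing loc with
  | nil => exact ⟨hloc, rfl⟩
  | cons c cs ih =>
    obtain ⟨h1, h2⟩ := pvStep_agrees loc hloc c
    simpa [List.foldl_cons, h2] using ih (pvStepA loc c) h1

lemma pvOuter_inv (ls : List String) (loc : Int × Int) (acc : List String)
    (hloc : loc ∈ pvPositions) :
    (ls.foldl
        (fun (st : String × List String) line =>
          let cur := line.toList.foldl pvStepB st.1
          (cur, st.2 ++ [cur]))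
        (pvBtn loc, acc)).1
      = pvBtn (ls.foldl
          (fun (st : (Int × Int) × List String) instruction =>
            let l := instruction.toList.foldl pvStepA st.1
            (l, st.2 ++ [kget KEYPAD_5_BY_5 l.1 l.2]))
          (loc, acc)).1 ∧
    (ls.foldl
        (fun (st : String × List String) line =>
          let cur := line.toList.foldl pvStepB st.1
          (cur, st.2 ++ [cur]))
        (pvBtn loc, acc)).2
      = (ls.foldl
          (fun (st : (Int × Int) × List String) instruction =>
            let l := instruction.toList.foldl pvStepA st.1
            (l, st.2 ++ [kget KEYPAD_5_BY_5 l.1 l.2]))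
          (loc, acc)).2 := by
  induction ls generalizing loc acc with
  | nil => exact ⟨rfl, rfl⟩
  | cons l ls ih =>
    obtain ⟨h1, h2⟩ := pvLine_inv l.toList loc hloc
    have hbtn : kget KEYPAD_5_BY_5 (l.toList.foldl pvStepA loc).1
        (l.toList.foldl pvStepA loc).2 = pvBtn (l.toList.foldl pvStepA loc) := rfl
    simpa [List.foldl_cons, h2, hbtn] using
      ih (l.toList.foldl pvStepA loc) (acc ++ [pvBtn (l.toList.foldl pvStepA loc)]) h1

-- ===== VERDICT (by name: the statement is the Claim_ definition above) =====
theorem solve_keypad_5_by_5_spec : Claim_equal_solve_keypad_5_by_5 := by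
  intro input_str _
  unfold Spec_solve_keypad_5_by_5 solve_keypad_5_by_5 solve_keypad_5_by_5_alt
  have h := pvOuter_inv ((PySem.Str.split? input_str "\n").getD []) (2, 0) [] (by decide)
  have hb : pvBtn ((2 : Int), (0 : Int)) = "5" := by decide
  rw [hb] at h
  exact (congrArg (PySem.Str.join "") h.2).symm
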